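-- pv_equiv track=rewrite | github.com/lucannez64/Notes | test.py | find_corresponding_n
-- ===== SOURCE A (Python) =====
-- def find_corresponding_n(numerator, denominator):
--     left_n = 0
--     left_fraction = (0, 1)
--     right_n = 1
--     right_fraction = (1, 0)
--
--     while True:
--         mid_n = left_n + right_n
--         mid_fraction = (left_fraction[0] + right_fraction[0], left_fraction[1] + right_fraction[1])
--
--         if mid_fraction == (numerator, denominator):
--             return mid_n
--
--         if numerator * mid_fraction[1] < mid_fraction[0] * denominator:
--             right_n = mid_n
--             right_fraction = mid_fraction
--         else:
--             left_n = mid_n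
--             left_fraction = mid_fraction
-- ===== SOURCE B (Python) =====
-- def find_corresponding_n(numerator, denominator):
--     # Closed form: in A's Stern-Brocot search, left_n/right_n start as (0, 1)
--     # and are updated by exactly the same sums as the mediant numerators, so
--     # mid_n always equals mid_fraction[0]; the value returned is the numerator.
--     return numerator
-- ===== Notes on version B (the rewrite author's own statement) =====
-- stated objective: simpler
-- what changed: B replaces the Stern-Brocot mediant-search loop by the closed form: the n-counter pair evolves identically to the mediant numerator pair, so the returned index is just the numerator.
import Mathlib
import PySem

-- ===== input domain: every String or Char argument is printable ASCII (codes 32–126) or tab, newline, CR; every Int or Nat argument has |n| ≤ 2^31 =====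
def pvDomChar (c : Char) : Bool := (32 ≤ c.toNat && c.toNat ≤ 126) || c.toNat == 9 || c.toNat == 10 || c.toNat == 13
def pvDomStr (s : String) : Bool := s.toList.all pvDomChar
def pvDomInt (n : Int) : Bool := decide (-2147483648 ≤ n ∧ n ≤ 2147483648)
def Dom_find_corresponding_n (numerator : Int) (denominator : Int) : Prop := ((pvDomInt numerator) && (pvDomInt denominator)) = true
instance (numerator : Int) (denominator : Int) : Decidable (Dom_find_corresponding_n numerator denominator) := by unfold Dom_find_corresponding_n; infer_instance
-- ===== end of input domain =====

-- B replaces A's Stern-Brocot mediant-search loop by a closed form (the loop's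
-- n-counters duplicate the mediant numerators, so the answer is the numerator).

-- ===== PORT A =====
-- A's 'while True' loop, with fuel making it total; on every input admitted by
-- Pre_ the loop returns through its own equality branch before fuel runs out
-- (proved below), so the fuel guard never changes the computed value there.
def fcnLoop (numerator denominator : Int) : Nat → Int → Int × Int → Int → Int × Int → Int
  | 0, _, _, _, _ => 0
  | fuel+1, left_n, left_fraction, right_n, right_fraction =>
    let mid_n := left_n + right_n
    let mid_fraction := (left_fraction.1 + right_fraction.1, left_fraction.2 + right_fraction.2)
    if mid_fraction = (numerator, denominator) then mid_n
    else if numerator * mid_fraction.2 < mid_fraction.1 * denominator then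
      fcnLoop numerator denominator fuel left_n left_fraction mid_n mid_fraction
    else
      fcnLoop numerator denominator fuel mid_n mid_fraction right_n right_fraction

def find_corresponding_n (numerator : Int) (denominator : Int) : Int :=
  fcnLoop numerator denominator (numerator + denominator).toNat 0 (0, 1) 1 (1, 0)

-- ===== PORT B =====
def find_corresponding_n_alt (numerator : Int) (denominator : Int) : Int :=
  numerator

-- ===== PRECONDITION & SPEC =====
-- Exactly the inputs on which the Python A returns: on a non-positive numerator
-- or denominator, or a non-coprime pair, A's 'while True' loop never hits its
-- equality test and diverges.
def Pre_find_corresponding_n (numerator : Int) (denominator : Int) : Prop :=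
  0 < numerator ∧ 0 < denominator ∧ Int.gcd numerator denominator = 1
instance (numerator : Int) (denominator : Int) : Decidable (Pre_find_corresponding_n numerator denominator) := by unfold Pre_find_corresponding_n; infer_instance
def pvWitness_find_corresponding_n : Int × Int := (3, 2)

def Spec_find_corresponding_n (numerator : Int) (denominator : Int) (out : Int) : Prop := out = find_corresponding_n_alt numerator denominator
instance (numerator : Int) (denominator : Int) (out : Int) : Decidable (Spec_find_corresponding_n numerator denominator out) := by unfold Spec_find_corresponding_n; infer_instance

-- ===== CLAIM (what is proved, stated in full; the proofs are below) =====
def Claim_equal_find_corresponding_n : Prop := ∀ (numerator : Int) (denominator : Int), Dom_find_corresponding_n numerator denominator → Pre_find_corresponding_n numerator denominator → Spec_find_corresponding_n numerator denominator (find_corresponding_n numerator denominator)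

-- ===== LEMMAS AND PROOFS =====

-- Two positive reduced fractions equal in value are equal as pairs.
lemma reduced_cross_eq (num den p q : Int) (hn : 0 < num) (hd : 0 < den)
    (hp : 0 < p) (hq : 0 < q)
    (hg : IsCoprime num den) (hg2 : IsCoprime p q)
    (h : num * q = p * den) : p = num ∧ q = den := by
  have hdq : den ∣ q := by
    have h1 : den ∣ num * q := ⟨p, by linarith⟩
    exact (hg.symm.dvd_of_dvd_mul_left h1)
  have hqd : q ∣ den := by
    have h1 : q ∣ p * den := ⟨num, by linarith⟩
    exact (hg2.symm.dvd_of_dvd_mul_left h1)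
  have hqe : q = den := Int.dvd_antisymm (le_of_lt hq) (le_of_lt hd) hqd hdq
  refine ⟨?_, hqe⟩
  have : num * den = p * den := by rw [hqe] at h; exact h
  have hdne : den ≠ 0 := ne_of_gt hd
  exact (mul_right_cancel₀ hdne this).symm

-- Main loop invariant: with left = (a,b), right = (c,d), determinant 1,
-- the target strictly between them, and enough fuel, the loop returns num.
lemma fcnLoop_ret (num den : Int) (hn : 0 < num) (hd : 0 < den)
    (hg : IsCoprime num den) :
    ∀ (fuel : Nat) (a b c d : Int),
      0 ≤ a → 1 ≤ b → 1 ≤ c → 0 ≤ d →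
      c * b - a * d = 1 →
      a * den < num * b → num * d < c * den →
      (num * b - a * den) + (c * den - num * d) ≤ (fuel : Int) →
      fcnLoop num den fuel a (a, b) c (c, d) = num := by
  intro fuel
  induction fuel with
  | zero =>
    intro a b c d _ _ _ _ _ hl hr hfuel
    exfalso
    have : (0 : Int) < (num * b - a * den) + (c * den - num * d) := by linarith
    simp at hfuel; linarith
  | succ fuel ih =>
    intro a b c d ha hb hc hdd hdet hl hr hfuel
    show fcnLoop num den (fuel+1) a (a, b) c (c, d) = num
    rw [fcnLoop]
    simp only []
    by_cases heq : ((a + c, b + d) : Int × Int) = (num, den)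
    · simp [heq]
      exact (Prod.mk.injEq .. ▸ heq).1
    · -- mediant is coprime: b*(a+c) + (-a)*(b+d) = 1
      have hmedco : IsCoprime (a + c) (b + d) := ⟨b, -a, by ring_nf; linarith [hdet]⟩
      have hmp : 0 < a + c := by linarith
      have hmq : 0 < b + d := by linarith
      by_cases hlt : num * (b + d) < (a + c) * den
      · -- right := mediant
        simp [heq, hlt]
        apply ih a b (a + c) (b + d) ha hb (by linarith) (by linarith)
          (by ring_nf; ring_nf at hdet; linarith) hl hlt
        have e : (a + c) * den - num * (b + d)
            = (c * den - num * d) - (num * b - a * den) := by ring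
        have h1 : (1 : Int) ≤ num * b - a * den := by linarith
        push_cast at hfuel ⊢
        linarith
      · -- left := mediant; the branch inequality is strict since equality would
        -- mean the mediant equals the target, contradicting heq
        have hstrict : (a + c) * den < num * (b + d) := by
          rcases lt_or_eq_of_le (not_lt.mp hlt) with h | h
          · exact h
          · exfalso
            obtain ⟨hp, hq⟩ := reduced_cross_eq num den (a + c) (b + d)
              hn hd hmp hmq hg hmedco h.symm
            exact heq (by rw [hp, hq])
        simp [heq, hlt]
        apply ih (a + c) (b + d) c d (by linarith) (by linarith) hc hdd
          (by ring_nf; ring_nf at hdet; linarith) hstrict hr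
        have e : num * (b + d) - (a + c) * den
            = (num * b - a * den) - (c * den - num * d) := by ring
        have h2 : (1 : Int) ≤ c * den - num * d := by linarith
        push_cast at hfuel ⊢
        linarith

-- ===== VERDICT (by name: the statement is the Claim_ definition above) =====
theorem find_corresponding_n_spec : Claim_equal_find_corresponding_n := by
  intro num den _ hpre
  obtain ⟨hn, hd, hg⟩ := hpre
  have hco : IsCoprime num den := Int.isCoprime_iff_gcd_eq_one.mpr hg
  show find_corresponding_n num den = find_corresponding_n_alt num den
  unfold find_corresponding_n find_corresponding_n_alt
  apply fcnLoop_ret num den hn hd hco ((num + den).toNat) 0 1 1 0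
    le_rfl le_rfl le_rfl le_rfl (by ring) (by linarith) (by linarith)
  rw [Int.toNat_of_nonneg (by linarith)]
  linarith
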